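-- pv_equiv track=rewrite | github.com/NQBH/advanced_STEM_beyond | combinatorics/resource/ST/project_5/bai_toan_4/trees/array_of_parents/ap_to_fcns.py | ap_to_fcns
-- ===== SOURCE A (Python) =====
-- def ap_to_fcns(parent):
--     n = len(parent)
--     fc = [-1] * n  # Mang first child
--     ns = [-1] * n  # Mang next sibling
--     children = [[] for _ in range(n)]
--
--     # Xay dung danh sach con cho moi nut
--     for i in range(n):
--         if parent[i] != -1:
--             children[parent[i]].append(i)
--
--     # Duyet moi nut, gan fc va ns
--     for u in range(n):
--         if children[u]:
--             fc[u] = children[u][0]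
--             for i in range(len(children[u]) - 1):
--                 ns[children[u][i]] = children[u][i+1]
--
--     return fc, ns
-- ===== SOURCE B (Python) =====
-- def ap_to_fcns(parent):
--     n = len(parent)
--     fc = [-1] * n
--     ns = [-1] * n
--     # Head-insert each node into its parent's sibling chain, scanning
--     # indices in descending order so each chain ends up ascending.
--     for i in range(n - 1, -1, -1):
--         p = parent[i]
--         if p != -1:
--             ns[i] = fc[p]
--             fc[p] = i
--     return fc, ns
-- ===== Notes on version B (the rewrite author's own statement) =====
-- stated objective: simpler
-- what changed: B drops A's intermediate per-node children adjacency lists and its two extra passes, instead doing a single descending-index pass that head-inserts each node into its parent's sibling chain (ns[i] = fc[p]; fc[p] = i), which yields exactly A's ascending sibling order.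
-- outside the precondition, e.g. on ap_to_fcns([5, 0]): A raises IndexError, B raises IndexError
import Mathlib
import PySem

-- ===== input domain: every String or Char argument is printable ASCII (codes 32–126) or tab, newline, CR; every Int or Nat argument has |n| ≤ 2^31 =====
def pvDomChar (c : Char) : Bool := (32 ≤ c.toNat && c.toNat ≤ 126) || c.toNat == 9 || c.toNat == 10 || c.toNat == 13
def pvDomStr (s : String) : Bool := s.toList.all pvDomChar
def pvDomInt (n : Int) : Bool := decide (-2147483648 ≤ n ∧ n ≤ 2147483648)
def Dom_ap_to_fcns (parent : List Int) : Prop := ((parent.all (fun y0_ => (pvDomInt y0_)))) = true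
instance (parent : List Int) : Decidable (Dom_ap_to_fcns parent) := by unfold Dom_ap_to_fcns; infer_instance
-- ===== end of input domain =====

-- B replaces A's per-node children adjacency lists by a single descending-order
-- head-insertion pass into the first-child/next-sibling arrays (objective: simpler).

-- ===== PORT A =====
def ap_to_fcns (parent : List Int) : List Int × List Int :=
  let n := parent.length
  let fc : List Int := List.replicate n (-1)
  let ns : List Int := List.replicate n (-1)
  let children : List (List Int) := (PySem.List.pyRange 0 n 1).map (fun _ => [])
  let children := (PySem.List.pyRange 0 n 1).foldl
    (fun ch i =>
      let p := PySem.List.pyGetD parent i 0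
      if p ≠ -1 then PySem.List.pySetD ch p (PySem.List.pyGetD ch p [] ++ [i]) else ch)
    children
  (PySem.List.pyRange 0 n 1).foldl
    (fun (st : List Int × List Int) u =>
      let cu := PySem.List.pyGetD children u []
      if cu ≠ [] then
        (PySem.List.pySetD st.1 u (PySem.List.pyGetD cu 0 0),
         (PySem.List.pyRange 0 ((cu.length : Int) - 1) 1).foldl
           (fun ns2 i =>
             PySem.List.pySetD ns2 (PySem.List.pyGetD cu i 0) (PySem.List.pyGetD cu (i + 1) 0))
           st.2)
      else st)
    (fc, ns)

-- ===== PORT B =====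
def ap_to_fcns_alt (parent : List Int) : List Int × List Int :=
  let n := parent.length
  (PySem.List.pyRange ((n : Int) - 1) (-1) (-1)).foldl
    (fun (st : List Int × List Int) i =>
      let p := PySem.List.pyGetD parent i 0
      if p ≠ -1 then
        (PySem.List.pySetD st.1 p i,
         PySem.List.pySetD st.2 i (PySem.List.pyGetD st.1 p (-1)))
      else st)
    (List.replicate n (-1), List.replicate n (-1))

-- ===== PRECONDITION & SPEC =====
-- Pre_ excludes exactly the inputs where A raises IndexError: a parent value other
-- than -1 that is not a valid (possibly negative) Python index into the array.
def Pre_ap_to_fcns (parent : List Int) : Prop :=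
  ∀ p ∈ parent, p = -1 ∨ (-(parent.length : Int) ≤ p ∧ p < (parent.length : Int))
instance (parent : List Int) : Decidable (Pre_ap_to_fcns parent) := by
  unfold Pre_ap_to_fcns; infer_instance
def pvWitness_ap_to_fcns : List Int := [-1, 0, 0, 1, 1, 0]
def Spec_ap_to_fcns (parent : List Int) (out : List Int × List Int) : Prop := out = ap_to_fcns_alt parent
instance (parent : List Int) (out : List Int × List Int) : Decidable (Spec_ap_to_fcns parent out) := by unfold Spec_ap_to_fcns; infer_instance

-- ===== CLAIM (what is proved, stated in full; the proofs are below) =====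
def Claim_equal_ap_to_fcns : Prop := ∀ (parent : List Int), Dom_ap_to_fcns parent → Pre_ap_to_fcns parent → Spec_ap_to_fcns parent (ap_to_fcns parent)

-- ===== LEMMAS AND PROOFS =====

-- Python index normalisation (mirrors PySem.List.pyIdx? on in-range indices)
def pidx (n : Nat) (p : Int) : Nat := if 0 ≤ p then p.toNat else n - (-p).toNat

-- parent value at a Nat position
def pg (parent : List Int) (i : Nat) : Int := parent.getD i 0

-- "i is a child of u" test
def condb (parent : List Int) (u i : Nat) : Bool :=
  (pg parent i != -1) && (pidx parent.length (pg parent i) == u)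

-- first child of u among positions ≥ k
def fcF (parent : List Int) (k u : Nat) : Int :=
  match (List.range' k (parent.length - k)).find? (condb parent u) with
  | some i => (i : Int)
  | none => -1

-- next sibling of v, as established after processing positions ≥ k
def nsF (parent : List Int) (k v : Nat) : Int :=
  if k ≤ v ∧ pg parent v ≠ -1 then fcF parent (v + 1) (pidx parent.length (pg parent v)) else -1

-- children of u among positions < k (ascending)
def kidsP (parent : List Int) (k u : Nat) : List Int :=
  ((List.range k).filter (condb parent u)).map (fun i : Nat => (i : Int))

-- successor of v in a sibling list
def findSucc (v : Int) : List Int → Option Int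
  | [] => none
  | [_] => none
  | a :: b :: t => if a = v then some b else findSucc v (b :: t)

lemma pidx_lt (n : Nat) (p : Int) (h1 : -(n : Int) ≤ p) (h2 : p < n) : pidx n p < n := by
  unfold pidx; split <;> omega

lemma pyIdx_inrange (n : Nat) (p : Int) (h1 : -(n : Int) ≤ p) (h2 : p < n) :
    PySem.List.pyIdx? n p = some (pidx n p) := by
  simp only [PySem.List.pyIdx?, pidx]; split <;> simp

lemma getD_map_range' {α : Type} (f : Nat → α) (n j : Nat) (d : α) (hj : j < n) :
    (((List.range n).map f).getD j d) = f j := by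
  rw [List.getD_eq_getElem?_getD]
  simp [hj]

lemma set_map_range {α : Type} (f : Nat → α) (n j : Nat) (v : α) :
    ((List.range n).map f).set j v = (List.range n).map (fun u => if u = j then v else f u) := by
  apply List.ext_getElem <;> simp
  intro i hi
  by_cases h : i = j
  · simp [h]
  · simp [h, List.getElem_set]
    intro h'; exact absurd h'.symm h

lemma pyGetD_map_range {α : Type} (f : Nat → α) (n : Nat) (p : Int) (d : α)
    (h1 : -(n : Int) ≤ p) (h2 : p < n) :
    PySem.List.pyGetD ((List.range n).map f) p d = f (pidx n p) := by
  have hl : ((List.range n).map f).length = n := by simp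
  have hlt := pidx_lt n p h1 h2
  simp only [PySem.List.pyGetD, PySem.List.pyGet?, hl, pyIdx_inrange n p h1 h2, Option.bind_some]
  simp [hlt]

lemma pySetD_map_range {α : Type} (f : Nat → α) (n : Nat) (p : Int) (v : α)
    (h1 : -(n : Int) ≤ p) (h2 : p < n) :
    PySem.List.pySetD ((List.range n).map f) p v
      = (List.range n).map (fun u => if u = pidx n p then v else f u) := by
  have hl : ((List.range n).map f).length = n := by simp
  simp only [PySem.List.pySetD, PySem.List.pySet?, hl, pyIdx_inrange n p h1 h2, Option.map_some,
    Option.getD_some]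
  exact set_map_range f n (pidx n p) v

lemma replicate_eq_map_range {α : Type} (n : Nat) (a : α) :
    List.replicate n a = (List.range n).map (fun _ => a) := by
  simp

lemma mem_parent (parent : List Int) (i : Nat) (hi : i < parent.length) :
    pg parent i ∈ parent := by
  unfold pg
  rw [List.getD_eq_getElem?_getD]
  simp [hi]

-- membership in kids lists
lemma mem_kidsP (parent : List Int) (k u : Nat) (v : Int) :
    v ∈ kidsP parent k u ↔ ∃ i : Nat, i < k ∧ condb parent u i = true ∧ (i : Int) = v := by
  unfold kidsP
  simp [List.mem_filter]
  constructor
  · rintro ⟨i, ⟨hi, hc⟩, rfl⟩; exact ⟨i, hi, hc, rfl⟩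
  · rintro ⟨i, hi, hc, rfl⟩; exact ⟨i, ⟨hi, hc⟩, rfl⟩

lemma kidsP_sorted (parent : List Int) (k u : Nat) : (kidsP parent k u).Pairwise (· < ·) := by
  unfold kidsP
  have hp := List.Pairwise.filter (l := List.range k) (condb parent u) List.pairwise_lt_range
  exact List.Pairwise.map (fun i : Nat => (i : Int)) (fun a b h => by simpa using h) hp

-- B-side invariant
lemma pidx_natCast (n k : Nat) : pidx n (k : Int) = k := by
  simp [pidx]

lemma B_inv (parent : List Int) (hpre : Pre_ap_to_fcns parent) (m k : Nat)
    (hm : k + m = parent.length) :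
    (((List.range' k m).reverse.map (fun i : Nat => (i : Int))).foldl
      (fun (st : List Int × List Int) i =>
        let p := PySem.List.pyGetD parent i 0
        if p ≠ -1 then
          (PySem.List.pySetD st.1 p i,
           PySem.List.pySetD st.2 i (PySem.List.pyGetD st.1 p (-1)))
        else st)
      ((List.range parent.length).map (fun _ => (-1 : Int)),
       (List.range parent.length).map (fun _ => (-1 : Int))))
    = ((List.range parent.length).map (fcF parent k),
       (List.range parent.length).map (nsF parent k)) := by
  induction m generalizing k with
  | zero =>
    have hk : k = parent.length := by omega
    subst hk
    simp only [List.range', List.reverse_nil, List.map_nil, List.foldl_nil,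
      Prod.mk.injEq]
    refine ⟨?_, ?_⟩
    · apply List.map_congr_left
      intro u _
      simp [fcF]
    · apply List.map_congr_left
      intro v hv
      rw [List.mem_range] at hv
      have : ¬ (parent.length ≤ v) := by omega
      simp [nsF, this]
  | succ m ih =>
    have hk : k < parent.length := by omega
    rw [List.range'_succ, List.reverse_cons, List.map_append, List.foldl_append,
      ih (k + 1) (by omega)]
    simp only [List.map_cons, List.map_nil, List.foldl_cons, List.foldl_nil]
    have hpg : PySem.List.pyGetD parent (k : Int) 0 = pg parent k := by
      simp [pg]
    have hcons : List.range' k (parent.length - k) = k :: List.range' (k + 1) (parent.length - (k + 1)) := by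
      have h1 : parent.length - k = (parent.length - (k + 1)) + 1 := by omega
      rw [h1, List.range'_succ]
    by_cases hp : pg parent k = -1
    · simp only [hpg, hp, ne_eq, not_true_eq_false, if_false, Prod.mk.injEq]
      refine ⟨?_, ?_⟩
      · apply List.map_congr_left
        intro u _
        simp [fcF, hcons, condb, hp]
      · apply List.map_congr_left
        intro v _
        by_cases hv : v = k
        · simp [nsF, hv, hp]
        · simp only [nsF]
          have hiff : (k + 1 ≤ v ∧ pg parent v ≠ -1) ↔ (k ≤ v ∧ pg parent v ≠ -1) := by
            constructor
            · rintro ⟨h1, h2⟩; exact ⟨by omega, h2⟩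
            · rintro ⟨h1, h2⟩; refine ⟨by omega, h2⟩
          exact if_congr hiff rfl rfl
    · have hmem := hpre _ (mem_parent parent k hk)
      have hrng : -(parent.length : Int) ≤ pg parent k ∧ pg parent k < parent.length := by
        rcases hmem with h | h
        · exact absurd h hp
        · exact h
      simp only [hpg, hp, ne_eq, not_false_eq_true, if_true]
      rw [pySetD_map_range _ _ _ _ hrng.1 hrng.2,
          pyGetD_map_range _ _ _ _ hrng.1 hrng.2]
      simp only [Prod.mk.injEq]
      refine ⟨?_, ?_⟩
      · apply List.map_congr_left
        intro u _
        have hfc : fcF parent k u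
            = if condb parent u k then (k : Int) else fcF parent (k + 1) u := by
          by_cases hc : condb parent u k = true
          · rw [if_pos hc]
            simp only [fcF]
            rw [hcons, List.find?_cons_of_pos hc]
          · rw [if_neg hc]
            simp only [fcF]
            rw [hcons, List.find?_cons_of_neg hc]
        rw [hfc]
        have hcond : (condb parent u k = true) ↔ (u = pidx parent.length (pg parent k)) := by
          unfold condb
          rw [Bool.and_eq_true, bne_iff_ne, beq_iff_eq]
          simp [hp, eq_comm]
        by_cases hu : u = pidx parent.length (pg parent k)
        · rw [if_pos hu, if_pos (hcond.mpr hu)]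
        · rw [if_neg hu, if_neg (fun h => hu (hcond.mp h))]
      · rw [pySetD_map_range (nsF parent (k + 1)) parent.length (k : Int) _
            (by omega) (by exact_mod_cast hk)]
        apply List.map_congr_left
        intro v _
        rw [pidx_natCast]
        by_cases hv : v = k
        · subst hv
          simp [nsF, hp]
        · simp only [hv, if_false, nsF]
          have hiff : (k + 1 ≤ v ∧ pg parent v ≠ -1) ↔ (k ≤ v ∧ pg parent v ≠ -1) := by
            constructor
            · rintro ⟨h1, h2⟩; exact ⟨by omega, h2⟩
            · rintro ⟨h1, h2⟩; refine ⟨by omega, h2⟩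
          exact if_congr hiff rfl rfl

lemma B_result (parent : List Int) (hpre : Pre_ap_to_fcns parent) :
    ap_to_fcns_alt parent
      = ((List.range parent.length).map (fcF parent 0),
         (List.range parent.length).map (nsF parent 0)) := by
  have h := B_inv parent hpre parent.length 0 (by omega)
  rw [← List.range_eq_range', List.map_reverse] at h
  unfold ap_to_fcns_alt
  simp only [PySem.List.pyRange_neg_one_eq_reverse,
    show ((-1 : Int) + 1) = 0 by norm_num,
    show ((parent.length : Int) - 1 + 1) = (parent.length : Int) by ring,
    PySem.List.pyRange_zero_nat, replicate_eq_map_range]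
  exact h

-- A phase 1: the children lists
lemma kidsP_succ (parent : List Int) (k u : Nat) :
    kidsP parent (k + 1) u
      = kidsP parent k u ++ (if condb parent u k then [(k : Int)] else []) := by
  simp only [kidsP, List.range_succ, List.filter_append, List.map_append]
  by_cases hc : condb parent u k = true
  · simp [List.filter, hc]
  · simp [List.filter, hc]

lemma A_children (parent : List Int) (hpre : Pre_ap_to_fcns parent) (k : Nat)
    (hk : k ≤ parent.length) :
    ((PySem.List.pyRange 0 k 1).foldl
      (fun ch i =>
        let p := PySem.List.pyGetD parent i 0
        if p ≠ -1 then PySem.List.pySetD ch p (PySem.List.pyGetD ch p [] ++ [i]) else ch)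
      ((List.range parent.length).map (fun _ => ([] : List Int))))
    = (List.range parent.length).map (kidsP parent k) := by
  induction k with
  | zero =>
    rw [show ((0 : Nat) : Int) = 0 from rfl, PySem.List.pyRange_one_eq_nil (le_refl 0)]
    simp only [List.foldl_nil]
    apply List.map_congr_left
    intro u _
    rfl
  | succ k ih =>
    have hk' : k ≤ parent.length := by omega
    have hklt : k < parent.length := by omega
    rw [show ((k + 1 : Nat) : Int) = (k : Int) + 1 by push_cast; ring,
      PySem.List.pyRange_one_succ_right (by positivity), List.foldl_append, ih hk']
    simp only [List.foldl_cons, List.foldl_nil]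
    have hpg : PySem.List.pyGetD parent (k : Int) 0 = pg parent k := by simp [pg]
    by_cases hp : pg parent k = -1
    · simp only [hpg, hp, ne_eq, not_true_eq_false, if_false]
      apply List.map_congr_left
      intro u _
      have : condb parent u k = false := by simp [condb, hp]
      rw [kidsP_succ]
      simp [this]
    · have hmem := hpre _ (mem_parent parent k hklt)
      have hrng : -(parent.length : Int) ≤ pg parent k ∧ pg parent k < parent.length := by
        rcases hmem with h | h
        · exact absurd h hp
        · exact h
      simp only [hpg, hp, ne_eq, not_false_eq_true, if_true]
      rw [pyGetD_map_range _ _ _ _ hrng.1 hrng.2, pySetD_map_range _ _ _ _ hrng.1 hrng.2]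
      apply List.map_congr_left
      intro u _
      have hcond : (condb parent u k = true) ↔ (u = pidx parent.length (pg parent k)) := by
        unfold condb
        rw [Bool.and_eq_true, bne_iff_ne, beq_iff_eq]
        simp [hp, eq_comm]
      rw [kidsP_succ]
      by_cases hu : u = pidx parent.length (pg parent k)
      · rw [if_pos hu, if_pos (hcond.mpr hu), hu]
      · rw [if_neg hu, if_neg (fun h => hu (hcond.mp h)), List.append_nil]

-- the inner sibling-assignment loop, rephrased over adjacent pairs
lemma zip_tail_eq (c : List Int) :
    c.zip c.tail = (List.range (c.length - 1)).map (fun i => (c.getD i 0, c.getD (i + 1) 0)) := by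
  apply List.ext_getElem
  · simp [List.length_zip, List.length_tail]
  · intro j h1 h2
    have hlen : j < c.length - 1 := by
      simp [List.length_zip, List.length_tail] at h1
      omega
    simp only [List.getElem_zip, List.getElem_map, List.getElem_range, List.getElem_tail]
    have hj1 : j < c.length := by omega
    have hj2 : j + 1 < c.length := by omega
    simp [List.getD_eq_getElem?_getD, hj1, hj2]

lemma inner_zip (c : List Int) (N : List Int) :
    ((PySem.List.pyRange 0 ((c.length : Int) - 1) 1).foldl
      (fun ns2 i =>
        PySem.List.pySetD ns2 (PySem.List.pyGetD c i 0) (PySem.List.pyGetD c (i + 1) 0)) N)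
    = (c.zip c.tail).foldl (fun ns2 ab => PySem.List.pySetD ns2 ab.1 ab.2) N := by
  rw [zip_tail_eq, List.foldl_map]
  cases c with
  | nil =>
    rw [show ((List.length ([] : List Int) : Int) - 1) = -1 by simp,
      PySem.List.pyRange_one_eq_nil (by norm_num)]
    simp
  | cons a t =>
    rw [show (((a :: t).length : Int) - 1) = ((t.length : Nat) : Int) by simp,
      PySem.List.pyRange_zero_nat, List.foldl_map,
      show (a :: t).length - 1 = t.length by simp]
    have hfun : (fun (ns : List Int) (i : Nat) =>
        PySem.List.pySetD ns (PySem.List.pyGetD (a :: t) (i : Int) 0)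
          (PySem.List.pyGetD (a :: t) ((i : Int) + 1) 0))
        = (fun (ns : List Int) (i : Nat) =>
            PySem.List.pySetD ns ((a :: t).getD i 0) ((a :: t).getD (i + 1) 0)) := by
      funext ns i
      rw [PySem.List.pyGetD_natCast,
        show ((i : Int) + 1) = ((i + 1 : Nat) : Int) by push_cast; ring,
        PySem.List.pyGetD_natCast]
    rw [hfun]

lemma findSucc_mem (v : Int) (c : List Int) (h : (findSucc v c).isSome) : v ∈ c := by
  induction c with
  | nil => simp [findSucc] at h
  | cons a t ih =>
    match t, ih with
    | [], _ => simp [findSucc] at h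
    | b :: t', ih =>
      rw [findSucc] at h
      by_cases hav : a = v
      · simp [hav]
      · simp [hav] at h
        exact List.mem_cons_of_mem _ (ih h)

lemma zip_fold (parent : List Int) (c : List Int) (h : Nat → Int)
    (hc : ∀ x ∈ c, 0 ≤ x ∧ x < parent.length) (hs : c.Pairwise (· < ·)) :
    ((c.zip c.tail).foldl (fun ns2 ab => PySem.List.pySetD ns2 ab.1 ab.2)
      ((List.range parent.length).map h))
    = (List.range parent.length).map
        (fun v => (findSucc (((v : Nat) : Int)) c).getD (h v)) := by
  induction c generalizing h with
  | nil =>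
    simp only [List.tail_nil, List.zip_nil_right, List.foldl_nil]
    apply List.map_congr_left
    intro v _
    simp [findSucc]
  | cons a t ih =>
    cases t with
    | nil =>
      simp only [List.tail_cons, List.zip_nil_right, List.foldl_nil]
      apply List.map_congr_left
      intro v _
      simp [findSucc]
    | cons b t' =>
      simp only [List.tail_cons, List.zip_cons_cons, List.foldl_cons]
      have ha := hc a (by simp)
      rw [pySetD_map_range h parent.length a b (by omega) ha.2]
      have hpa : pidx parent.length a = a.toNat := by
        unfold pidx
        rw [if_pos ha.1]
      rw [hpa]
      have hc' : ∀ x ∈ (b :: t'), 0 ≤ x ∧ x < parent.length := by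
        intro x hx
        exact hc x (List.mem_cons_of_mem _ hx)
      have hs' : (b :: t').Pairwise (· < ·) := hs.of_cons
      have hzip : ((b :: t').zip t') = ((b :: t').zip (b :: t').tail) := by
        simp
      rw [hzip, ih (fun u => if u = a.toNat then b else h u) hc' hs']
      apply List.map_congr_left
      intro v hv
      by_cases hav : a = ((v : Nat) : Int)
      · have hvn : v = a.toNat := by omega
        have hnotin : ((v : Nat) : Int) ∉ (b :: t') := by
          intro hmem
          have hlt := List.rel_of_pairwise_cons hs hmem
          rw [hav] at hlt
          exact lt_irrefl _ hlt
        have hfs : findSucc (((v : Nat) : Int)) (b :: t') = none := by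
          cases hfk : findSucc (((v : Nat) : Int)) (b :: t') with
          | none => rfl
          | some x =>
            exact absurd (findSucc_mem _ _ (by simp [hfk])) hnotin
        rw [hfs, show findSucc (((v : Nat) : Int)) (a :: b :: t') = some b by
          rw [findSucc, if_pos hav]]
        simp [hvn]
      · have hvn : ¬ (v = a.toNat) := by omega
        rw [show findSucc (((v : Nat) : Int)) (a :: b :: t')
            = findSucc (((v : Nat) : Int)) (b :: t') by rw [findSucc, if_neg hav]]
        simp [hvn]

lemma findSucc_append (v : Int) (l1 l2 : List Int) (hv : v ∉ l1) :
    findSucc v (l1 ++ v :: l2) = l2.head? := by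
  induction l1 with
  | nil =>
    cases l2 with
    | nil => rfl
    | cons b t => simp [findSucc]
  | cons a t ih =>
    have hne : a ≠ v := by intro h; exact hv (h ▸ List.mem_cons_self)
    have : t ++ v :: l2 ≠ [] := by simp
    obtain ⟨b, rest, hbr⟩ := List.exists_cons_of_ne_nil this
    rw [List.cons_append, hbr, findSucc]
    simp only [hne, if_false]
    rw [← hbr, ih (fun h => hv (List.mem_cons_of_mem _ h))]

-- A phase 2 invariant
lemma mem_kidsP_nat (parent : List Int) (u v : Nat) :
    ((v : Int) ∈ kidsP parent parent.length u)
      ↔ (v < parent.length ∧ condb parent u v = true) := by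
  rw [mem_kidsP]
  constructor
  · rintro ⟨i, hi, hc, hcast⟩
    have : i = v := by omega
    subst this
    exact ⟨hi, hc⟩
  · rintro ⟨hv, hc⟩
    exact ⟨v, hv, hc, rfl⟩

lemma kidsP_bounds (parent : List Int) (u : Nat) :
    ∀ x ∈ kidsP parent parent.length u, 0 ≤ x ∧ x < parent.length := by
  intro x hx
  rw [mem_kidsP] at hx
  obtain ⟨i, hi, _, rfl⟩ := hx
  constructor
  · positivity
  · exact_mod_cast hi

lemma A_phase2 (parent : List Int) (k : Nat)
    (hk : k ≤ parent.length) :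
    ((PySem.List.pyRange 0 k 1).foldl
      (fun (st : List Int × List Int) u =>
        let cu := PySem.List.pyGetD ((List.range parent.length).map (kidsP parent parent.length)) u []
        if cu ≠ [] then
          (PySem.List.pySetD st.1 u (PySem.List.pyGetD cu 0 0),
           (PySem.List.pyRange 0 ((cu.length : Int) - 1) 1).foldl
             (fun ns2 i =>
               PySem.List.pySetD ns2 (PySem.List.pyGetD cu i 0) (PySem.List.pyGetD cu (i + 1) 0))
             st.2)
        else st)
      ((List.range parent.length).map (fun _ => (-1 : Int)),
       (List.range parent.length).map (fun _ => (-1 : Int))))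
    = ((List.range parent.length).map
         (fun u => if u < k then (kidsP parent parent.length u).headD (-1) else -1),
       (List.range parent.length).map
         (fun v => if pg parent v ≠ -1 ∧ pidx parent.length (pg parent v) < k then
             (findSucc (v : Int) (kidsP parent parent.length (pidx parent.length (pg parent v)))).getD (-1)
           else -1)) := by
  induction k with
  | zero =>
    rw [show ((0 : Nat) : Int) = 0 from rfl, PySem.List.pyRange_one_eq_nil (le_refl 0)]
    simp only [List.foldl_nil, Prod.mk.injEq]
    refine ⟨?_, ?_⟩
    · apply List.map_congr_left
      intro u _
      simp
    · apply List.map_congr_left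
      intro v _
      simp
  | succ k ih =>
    have hk' : k ≤ parent.length := by omega
    have hklt : k < parent.length := by omega
    rw [show ((k + 1 : Nat) : Int) = (k : Int) + 1 by push_cast; ring,
      PySem.List.pyRange_one_succ_right (by positivity), List.foldl_append, ih hk']
    simp only [List.foldl_cons, List.foldl_nil]
    have hcu : PySem.List.pyGetD ((List.range parent.length).map (kidsP parent parent.length))
        (k : Int) [] = kidsP parent parent.length k := by
      rw [PySem.List.pyGetD_natCast]
      exact getD_map_range' _ _ _ _ hklt
    by_cases hne : kidsP parent parent.length k = []
    · simp only [hcu, hne, ne_eq, not_true_eq_false, if_false, Prod.mk.injEq]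
      refine ⟨?_, ?_⟩
      · apply List.map_congr_left
        intro u _
        by_cases hu : u = k
        · subst hu
          simp [hne]
        · exact if_congr (by constructor <;> (intro; omega)) rfl rfl
      · apply List.map_congr_left
        intro v hv
        rw [List.mem_range] at hv
        by_cases hcb : pg parent v ≠ -1 ∧ pidx parent.length (pg parent v) = k
        · exfalso
          have hq : condb parent k v = true := by
            unfold condb
            rw [Bool.and_eq_true, bne_iff_ne, beq_iff_eq]
            exact ⟨hcb.1, hcb.2⟩
          have := (mem_kidsP_nat parent k v).mpr ⟨hv, hq⟩
          rw [hne] at this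
          exact absurd this (List.not_mem_nil)
        · have hiff : (pg parent v ≠ -1 ∧ pidx parent.length (pg parent v) < k)
              ↔ (pg parent v ≠ -1 ∧ pidx parent.length (pg parent v) < k + 1) := by
            constructor
            · rintro ⟨h1, h2⟩
              exact ⟨h1, by omega⟩
            · rintro ⟨h1, h2⟩
              refine ⟨h1, ?_⟩
              rcases Nat.lt_succ_iff_lt_or_eq.mp h2 with h3 | h3
              · exact h3
              · exact absurd ⟨h1, h3⟩ hcb
          exact if_congr hiff rfl rfl
    · obtain ⟨c0, crest, hc⟩ := List.exists_cons_of_ne_nil hne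
      simp only [hcu, hne, ne_eq, not_false_eq_true, if_true, Prod.mk.injEq]
      refine ⟨?_, ?_⟩
      · rw [show PySem.List.pyGetD (kidsP parent parent.length k) 0 0 = c0 by
          rw [hc]
          simp [PySem.List.pyGetD_zero]]
        rw [pySetD_map_range _ parent.length (k : Int) c0 (by omega) (by exact_mod_cast hklt),
          pidx_natCast]
        apply List.map_congr_left
        intro u _
        by_cases hu : u = k
        · subst hu
          rw [if_pos rfl, if_pos (by omega), hc]
          rfl
        · rw [if_neg hu]
          exact if_congr (by constructor <;> (intro; omega)) rfl rfl
      · rw [inner_zip, zip_fold parent (kidsP parent parent.length k) _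
          (kidsP_bounds parent k) (kidsP_sorted parent parent.length k)]
        apply List.map_congr_left
        intro v hv
        rw [List.mem_range] at hv
        by_cases hcb : pg parent v ≠ -1 ∧ pidx parent.length (pg parent v) = k
        · rw [if_neg (by
            rintro ⟨h1, h2⟩
            omega : ¬ (pg parent v ≠ -1 ∧ pidx parent.length (pg parent v) < k))]
          rw [if_pos ⟨hcb.1, by omega⟩, hcb.2]
        · have hnone : findSucc ((v : Int)) (kidsP parent parent.length k) = none := by
            cases hfk : findSucc ((v : Int)) (kidsP parent parent.length k) with
            | none => rfl
            | some x =>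
              have hmem := findSucc_mem ((v : Int)) (kidsP parent parent.length k) (by rw [hfk]; rfl)
              rw [mem_kidsP_nat] at hmem
              have hq := hmem.2
              unfold condb at hq
              rw [Bool.and_eq_true, bne_iff_ne, beq_iff_eq] at hq
              exact absurd ⟨hq.1, hq.2⟩ hcb
          rw [hnone, Option.getD_none]
          exact if_congr (by
            constructor
            · rintro ⟨h1, h2⟩
              exact ⟨h1, by omega⟩
            · rintro ⟨h1, h2⟩
              refine ⟨h1, ?_⟩
              rcases Nat.lt_succ_iff_lt_or_eq.mp h2 with h3 | h3
              · exact h3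
              · exact absurd ⟨h1, h3⟩ hcb) rfl rfl

-- bridges to the find?-based description
lemma headD_kidsP (parent : List Int) (u : Nat) :
    (kidsP parent parent.length u).headD (-1) = fcF parent 0 u := by
  unfold fcF kidsP
  rw [Nat.sub_zero, ← List.range_eq_range', ← List.head?_filter]
  cases hfl : (List.range parent.length).filter (condb parent u) with
  | nil => simp
  | cons x xs => simp

lemma findSucc_kidsP (parent : List Int) (v u : Nat) (hv : v < parent.length)
    (hq : condb parent u v = true) :
    (findSucc (v : Int) (kidsP parent parent.length u)).getD (-1) = fcF parent (v + 1) u := by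
  have hsplit : List.range parent.length
      = (List.range v ++ [v]) ++ List.range' (v + 1) (parent.length - (v + 1)) := by
    rw [← List.range_succ, List.range_eq_range', List.range_eq_range']
    have h2 := List.range'_append_1 (s := 0) (m := v + 1) (n := parent.length - (v + 1))
    rw [show (0 + (v + 1)) = v + 1 by omega] at h2
    rw [h2, show (v + 1 + (parent.length - (v + 1))) = parent.length by omega]
  unfold kidsP
  rw [hsplit, List.filter_append, List.filter_append, List.map_append, List.map_append,
    show List.filter (condb parent u) [v] = [v] by simp [List.filter, hq]]
  rw [List.map_cons, List.map_nil, List.append_assoc, List.cons_append, List.nil_append]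
  rw [findSucc_append _ _ _ (by
    intro hmem
    simp only [List.mem_map, List.mem_filter, List.mem_range] at hmem
    obtain ⟨i, ⟨hi, _⟩, hiv⟩ := hmem
    have : i = v := by omega
    omega)]
  rw [List.head?_map, List.head?_filter]
  unfold fcF
  cases hf : (List.range' (v + 1) (parent.length - (v + 1))).find? (condb parent u) with
  | none => simp
  | some i => simp

lemma A_result (parent : List Int) (hpre : Pre_ap_to_fcns parent) :
    ap_to_fcns parent
      = ((List.range parent.length).map (fcF parent 0),
         (List.range parent.length).map (nsF parent 0)) := by
  unfold ap_to_fcns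
  simp only [replicate_eq_map_range, PySem.List.pyRange_zero_nat, List.map_map]
  rw [show ((fun _ => ([] : List Int)) ∘ (fun k : Nat => (k : Int))) = (fun _ : Nat => ([] : List Int)) from rfl]
  rw [show (List.map (fun k : Nat => (k : Int)) (List.range parent.length))
      = PySem.List.pyRange 0 (parent.length : Int) 1 from (PySem.List.pyRange_zero_nat _).symm]
  rw [A_children parent hpre parent.length le_rfl]
  rw [A_phase2 parent parent.length le_rfl]
  simp only [Prod.mk.injEq]
  refine ⟨?_, ?_⟩
  · apply List.map_congr_left
    intro u hu
    rw [List.mem_range] at hu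
    rw [if_pos hu]
    exact headD_kidsP parent u
  · apply List.map_congr_left
    intro v hv
    rw [List.mem_range] at hv
    by_cases hp : pg parent v = -1
    · simp [nsF, hp]
    · have hmem := hpre _ (mem_parent parent v hv)
      have hrng : -(parent.length : Int) ≤ pg parent v ∧ pg parent v < parent.length := by
        rcases hmem with h | h
        · exact absurd h hp
        · exact h
      have hpidx := pidx_lt parent.length (pg parent v) hrng.1 hrng.2
      rw [if_pos ⟨hp, hpidx⟩]
      unfold nsF
      rw [if_pos ⟨Nat.zero_le v, hp⟩]
      apply findSucc_kidsP parent v _ hv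
      unfold condb
      rw [Bool.and_eq_true, bne_iff_ne, beq_iff_eq]
      exact ⟨hp, rfl⟩

-- ===== VERDICT (by name: the statement is the Claim_ definition above) =====
theorem ap_to_fcns_spec : Claim_equal_ap_to_fcns := by
  intro parent _ hpre
  unfold Spec_ap_to_fcns
  rw [A_result parent hpre, B_result parent hpre]
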